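-- pv_equiv track=rewrite | github.com/crmarsh/advent_of_code | 2022/day06/main.py | unique_start_index
-- ===== SOURCE A (Python) =====
-- def k_different(current_counts, k):
--     return len(current_counts) == k
--
-- def add_count(current_counts, c):
--     n = current_counts.get(c, 0)
--     current_counts[c] = n + 1
--
-- def remove_count(curr_counts, c):
--     curr_counts[c] -= 1
--     if not curr_counts[c]:
--         del curr_counts[c]
--
-- def unique_start_index(input_signal, num_unique):
--     current_counts = {}
--     for c in input_signal[:num_unique]:
--         add_count(current_counts, c)
--     for i in range(num_unique, len(input_signal)):
--         if k_different(current_counts, num_unique):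
--             return i
--         remove_count(current_counts, input_signal[i - num_unique])
--         add_count(current_counts, input_signal[i])
-- ===== SOURCE B (Python) =====
-- def unique_start_index(input_signal, num_unique):
--     for i in range(num_unique, len(input_signal)):
--         if len(set(input_signal[i - num_unique:i])) == num_unique:
--             return i
--     return None
-- ===== Notes on version B (the rewrite author's own statement) =====
-- stated objective: simpler
-- what changed: Replaces the incrementally maintained count dictionary (add/remove helpers) by a direct rescan: for each candidate index take the preceding window slice and test len(set(window)) == num_unique.
import Mathlib
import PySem

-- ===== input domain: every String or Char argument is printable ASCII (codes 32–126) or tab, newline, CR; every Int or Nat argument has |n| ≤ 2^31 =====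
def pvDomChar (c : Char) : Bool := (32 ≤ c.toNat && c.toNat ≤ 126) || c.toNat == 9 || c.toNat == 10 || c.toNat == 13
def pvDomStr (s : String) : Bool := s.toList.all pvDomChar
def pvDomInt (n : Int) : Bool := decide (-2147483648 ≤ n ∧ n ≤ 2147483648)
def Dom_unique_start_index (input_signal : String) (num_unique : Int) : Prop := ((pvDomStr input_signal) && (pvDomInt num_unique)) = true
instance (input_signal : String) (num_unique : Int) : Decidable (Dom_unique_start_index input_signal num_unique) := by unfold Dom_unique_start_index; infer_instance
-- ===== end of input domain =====

-- B replaces A's incrementally maintained count dictionary by a direct rescan of each window slice (simpler).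

-- ===== PORT A =====
-- add_count(current_counts, c)
def pvAddCount (d : PySem.Dict Char Int) (c : Char) : PySem.Dict Char Int :=
  d.insert c (d.getD c 0 + 1)

-- remove_count(curr_counts, c); none = the KeyError of 'curr_counts[c] -= 1' on a missing key
def pvRemoveCount (d : PySem.Dict Char Int) (c : Char) : Option (PySem.Dict Char Int) :=
  match d.get? c with
  | none => none
  | some n =>
      let d' := d.insert c (n - 1)
      some (if n - 1 = 0 then d'.erase c else d')

-- the 'for i in range(num_unique, len(input_signal))' loop with its early return;
-- a none from an index lookup = the IndexError / KeyError Python raises there (outside Pre_)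
def pvALoop (cs : List Char) (k : Int) : PySem.Dict Char Int → List Int → Option Int
  | _, [] => none
  | d, i :: rest =>
    if (d.size : Int) = k then some i    -- k_different(current_counts, num_unique)
    else
      match PySem.List.pyGet? cs (i - k), PySem.List.pyGet? cs i with
      | some cOld, some cNew =>
          match pvRemoveCount d cOld with
          | some d' => pvALoop cs k (pvAddCount d' cNew) rest
          | none => none
      | _, _ => none

def unique_start_index (input_signal : String) (num_unique : Int) : Option Int :=
  let cs := input_signal.toList
  let init := (PySem.List.slice cs none (some num_unique)).foldl pvAddCount PySem.Dict.empty
  pvALoop cs num_unique init (PySem.List.pyRange num_unique (cs.length : Int) 1)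

-- ===== PORT B =====
def pvBLoop (cs : List Char) (k : Int) : List Int → Option Int
  | [] => none
  | i :: rest =>
    if ((PySem.Set.ofList (PySem.List.slice cs (some (i - k)) (some i))).length : Int) = k
    then some i
    else pvBLoop cs k rest

def unique_start_index_alt (input_signal : String) (num_unique : Int) : Option Int :=
  let cs := input_signal.toList
  pvBLoop cs num_unique (PySem.List.pyRange num_unique (cs.length : Int) 1)

-- ===== PRECONDITION & SPEC =====
-- Pre_ excludes only negative num_unique, on which A always raises (KeyError or IndexError).
def Pre_unique_start_index (input_signal : String) (num_unique : Int) : Prop := 0 ≤ num_unique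
instance (input_signal : String) (num_unique : Int) : Decidable (Pre_unique_start_index input_signal num_unique) := by unfold Pre_unique_start_index; infer_instance

def pvWitness_unique_start_index : String × Int := ("mjqjpqmgbljsphdztnvjfqwrcgsmlb", 4)

def Spec_unique_start_index (input_signal : String) (num_unique : Int) (out : Option Int) : Prop := out = unique_start_index_alt input_signal num_unique
instance (input_signal : String) (num_unique : Int) (out : Option Int) : Decidable (Spec_unique_start_index input_signal num_unique out) := by unfold Spec_unique_start_index; infer_instance

-- ===== CLAIM (what is proved, stated in full; the proofs are below) =====
def Claim_equal_unique_start_index : Prop := ∀ (input_signal : String) (num_unique : Int), Dom_unique_start_index input_signal num_unique → Pre_unique_start_index input_signal num_unique → Spec_unique_start_index input_signal num_unique (unique_start_index input_signal num_unique)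

-- ===== LEMMAS AND PROOFS =====

-- d faithfully counts the characters of the window w (keys unique, lookup = multiplicity, no zero entries)
def pvInv (d : PySem.Dict Char Int) (w : List Char) : Prop :=
  d.keys.Nodup ∧ ∀ c : Char, d.get? c = if w.count c = 0 then none else some ((w.count c : Int))

theorem pvInv_size {d : PySem.Dict Char Int} {w : List Char} (h : pvInv d w) :
    d.size = (PySem.Set.ofList w).length := by
  obtain ⟨hnd, hget⟩ := h
  have hsz : d.size = d.keys.length := by
    simp [PySem.Dict.size, PySem.Dict.keys]
  rw [hsz]
  have hperm : d.keys.Perm (PySem.Set.ofList w) := by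
    rw [List.perm_ext_iff_of_nodup hnd (PySem.Set.nodup_ofList w)]
    intro c
    rw [PySem.Set.mem_ofList]
    constructor
    · intro hc
      by_contra hcw
      have h0 : w.count c = 0 := List.count_eq_zero.mpr hcw
      have : d.get? c = none := by rw [hget c, if_pos h0]
      exact ((PySem.Dict.get?_eq_none_iff_not_mem_keys d c).mp this) hc
    · intro hcw
      have h0 : w.count c ≠ 0 := by simpa [List.count_eq_zero] using hcw
      by_contra hc
      have := (PySem.Dict.get?_eq_none_iff_not_mem_keys d c).mpr hc
      rw [hget c, if_neg h0] at this
      simp at this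
  exact hperm.length_eq

theorem pvInv_init (w : List Char) : pvInv (w.foldl pvAddCount PySem.Dict.empty) w := by
  have hc : w.foldl pvAddCount PySem.Dict.empty = PySem.Dict.counter w := by
    rw [← PySem.Dict.foldl_insert_getD_add_one_eq_counter]
    rfl
  rw [hc]
  refine ⟨by rw [PySem.Dict.keys_counter]; exact PySem.Set.nodup_ofList w, fun c => ?_⟩
  by_cases h0 : w.count c = 0
  · rw [if_pos h0]
    rw [PySem.Dict.get?_eq_none_iff_not_mem_keys, PySem.Dict.keys_counter, PySem.Set.mem_ofList]
    exact List.count_eq_zero.mp h0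
  · rw [if_neg h0]
    have hmem : c ∈ (PySem.Dict.counter w).keys := by
      rw [PySem.Dict.keys_counter, PySem.Set.mem_ofList]
      exact List.count_pos_iff.mp (Nat.pos_of_ne_zero h0)
    have : (PySem.Dict.counter w).get? c ≠ none := by
      rw [Ne, PySem.Dict.get?_eq_none_iff_not_mem_keys]; exact fun h => h hmem
    obtain ⟨v, hv⟩ := Option.ne_none_iff_exists'.mp this
    rw [hv]
    have := PySem.Dict.getD_counter (xs := w) (v := c)
    rw [PySem.Dict.getD_eq_get?_getD, hv] at this
    simp at this
    simp [this]

theorem pvGet?_erase {d : PySem.Dict Char Int} (c c' : Char) :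
    (d.erase c).get? c' = if c' = c then none else d.get? c' := by
  unfold PySem.Dict.erase PySem.Dict.get?
  by_cases h : c' = c
  · subst h
    rw [if_pos rfl, Option.map_eq_none_iff, List.find?_eq_none]
    intro p hp
    simp only [List.mem_filter] at hp
    simp only [beq_iff_eq]
    intro hc; exact absurd hc (by simpa using hp.2)
  · simp only [if_neg h]
    congr 1
    induction d.items with
    | nil => rfl
    | cons p rest ih =>
      by_cases hpc : p.1 = c
      · rw [List.filter_cons_of_neg (by simpa using hpc)]
        rw [List.find?_cons_of_neg (by simp [hpc]; exact fun hc => absurd hc.symm h)]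
        exact ih
      · rw [List.filter_cons_of_pos (by simpa using hpc)]
        by_cases hpc' : p.1 = c'
        · rw [List.find?_cons_of_pos (by simpa using hpc'), List.find?_cons_of_pos (by simpa using hpc')]
        · rw [List.find?_cons_of_neg (by simpa using hpc'), List.find?_cons_of_neg (by simpa using hpc')]
          exact ih

theorem pvNodup_keys_erase {d : PySem.Dict Char Int} (c : Char) (h : d.keys.Nodup) :
    (d.erase c).keys.Nodup := by
  unfold PySem.Dict.erase PySem.Dict.keys at *
  exact ((List.filter_sublist (l := d.items)).map _).nodup h

theorem pvInv_add {d : PySem.Dict Char Int} {w : List Char} (h : pvInv d w) (x : Char) :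
    pvInv (pvAddCount d x) (w ++ [x]) := by
  obtain ⟨hnd, hget⟩ := h
  refine ⟨PySem.Dict.nodup_keys_insert d x _ hnd, fun c => ?_⟩
  rw [pvAddCount, PySem.Dict.get?_insert]
  by_cases hcx : c = x
  · subst hcx
    have hcount : (w ++ [c]).count c = w.count c + 1 := by simp
    rw [if_pos rfl, hcount, if_neg (by omega)]
    have hD : d.getD c 0 = (w.count c : Int) := by
      rw [PySem.Dict.getD_eq_get?_getD, hget c]
      by_cases h0 : w.count c = 0
      · simp [h0]
      · simp [h0]
    rw [hD]
    push_cast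
    ring_nf
  · have hcount : (w ++ [x]).count c = w.count c := by
      simp [List.count_append, List.count_singleton]; exact fun h => hcx h.symm
    rw [if_neg hcx, hcount, hget c]

theorem pvInv_remove {d : PySem.Dict Char Int} {w : List Char} {c : Char} (h : pvInv d (c :: w)) :
    ∃ d', pvRemoveCount d c = some d' ∧ pvInv d' w := by
  obtain ⟨hnd, hget⟩ := h
  have hcc : (c :: w).count c = w.count c + 1 := by simp
  have hgc : d.get? c = some ((w.count c : Int) + 1) := by
    rw [hget c, if_neg (by omega), hcc]; push_cast; ring_nf
  rw [pvRemoveCount, hgc]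
  simp only []
  refine ⟨_, rfl, ?_⟩
  have hsub : ((w.count c : Int) + 1) - 1 = (w.count c : Int) := by ring
  by_cases h0 : w.count c = 0
  · rw [if_pos (by rw [hsub]; exact_mod_cast congrArg (Nat.cast (R := Int)) h0)]
    refine ⟨pvNodup_keys_erase c (PySem.Dict.nodup_keys_insert d c _ hnd), fun c' => ?_⟩
    rw [pvGet?_erase]
    by_cases hcc' : c' = c
    · subst hcc'
      rw [if_pos rfl, if_pos h0]
    · rw [if_neg hcc', PySem.Dict.get?_insert, if_neg hcc', hget c']
      have : (c :: w).count c' = w.count c' := by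
        simp [List.count_cons]; exact fun h => hcc' h.symm
      rw [this]
  · rw [if_neg (by rw [hsub]; exact_mod_cast fun hh => h0 (by exact_mod_cast hh))]
    refine ⟨PySem.Dict.nodup_keys_insert d c _ hnd, fun c' => ?_⟩
    rw [PySem.Dict.get?_insert]
    by_cases hcc' : c' = c
    · subst hcc'
      rw [if_pos rfl, if_neg h0, hsub]
    · rw [if_neg hcc', hget c']
      have : (c :: w).count c' = w.count c' := by
        simp [List.count_cons]; exact fun h => hcc' h.symm
      rw [this]

theorem pvLoop_eq (cs : List Char) (k : Int) (hk : 0 ≤ k) :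
    ∀ (n : Nat) (i : Int) (d : PySem.Dict Char Int), k ≤ i → i + n = (cs.length : Int) →
      pvInv d (PySem.List.slice cs (some (i - k)) (some i)) →
      pvALoop cs k d (PySem.List.pyRange i (cs.length : Int) 1) =
      pvBLoop cs k (PySem.List.pyRange i (cs.length : Int) 1) := by
  intro n
  induction n with
  | zero =>
    intro i d hki hlen _
    rw [PySem.List.pyRange_one_eq_nil (by omega)]
    rfl
  | succ n ih =>
    intro i d hki hlen hInv
    have hilt : i < (cs.length : Int) := by omega
    rw [PySem.List.pyRange_one_cons hilt]
    have hsize := pvInv_size hInv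
    simp only [pvALoop, pvBLoop, hsize]
    by_cases hcond : (((PySem.Set.ofList (PySem.List.slice cs (some (i - k)) (some i))).length : Int) = k)
    · rw [if_pos hcond, if_pos hcond]
    · rw [if_neg hcond, if_neg hcond]
      -- window arithmetic
      have hm0 : 0 ≤ i - k := by omega
      set m : Nat := (i - k).toNat with hmdef
      set kn : Nat := k.toNat with hkndef
      have hmi : i - k = (m : Int) := by omega
      have hkkn : k = (kn : Int) := by omega
      have hitn : i.toNat = m + kn := by omega
      have hw : PySem.List.slice cs (some (i - k)) (some i) = (cs.drop m).take kn := by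
        rw [PySem.List.slice_toNat cs hm0 (by omega)]
        congr 1
        omega
      -- kn ≠ 0, else the condition would hold
      have hkn0 : kn ≠ 0 := by
        intro h0
        apply hcond
        rw [hw, h0]
        simp [hkkn, h0]
      have hmlt : m < cs.length := by omega
      have hitlt : i.toNat < cs.length := by omega
      have hdrop : cs.drop m = cs[m] :: cs.drop (m + 1) := List.drop_eq_getElem_cons hmlt
      have hwcons : PySem.List.slice cs (some (i - k)) (some i)
          = cs[m] :: (cs.drop (m + 1)).take (kn - 1) := by
        rw [hw, hdrop]
        have : kn = (kn - 1) + 1 := by omega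
        rw [this, List.take_succ_cons]
        simp
      have hget1 : PySem.List.pyGet? cs (i - k) = some cs[m] := by
        rw [hmi, PySem.List.pyGet?_natCast, List.getElem?_eq_getElem hmlt]
      have hget2 : PySem.List.pyGet? cs i = some cs[i.toNat] := by
        rw [PySem.List.pyGet?_of_nonneg cs (by omega), List.getElem?_eq_getElem hitlt]
      rw [hget1, hget2]
      rw [hwcons] at hInv
      obtain ⟨d', hrem, hinvd'⟩ := pvInv_remove hInv
      show (match pvRemoveCount d cs[m] with
            | some d' => pvALoop cs k (pvAddCount d' cs[i.toNat]) (PySem.List.pyRange (i + 1) (cs.length : Int) 1)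
            | none => none) = pvBLoop cs k (PySem.List.pyRange (i + 1) (cs.length : Int) 1)
      rw [hrem]
      have hinvNext := pvInv_add hinvd' cs[i.toNat]
      have hwnext : (cs.drop (m + 1)).take (kn - 1) ++ [cs[i.toNat]]
          = PySem.List.slice cs (some ((i + 1) - k)) (some (i + 1)) := by
        rw [PySem.List.slice_toNat cs (by omega) (by omega)]
        have h1 : ((i + 1) - k).toNat = m + 1 := by omega
        have h2 : (i + 1).toNat - (m + 1) = kn := by omega
        rw [h1, h2]
        have hstep : (List.drop (m + 1) cs).take kn
            = List.take (kn - 1) (List.drop (m + 1) cs) ++ [cs[i.toNat]] := by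
          conv_lhs => rw [show kn = (kn - 1) + 1 from by omega]
          rw [List.take_add_one, List.getElem?_drop,
            show (m + 1) + (kn - 1) = i.toNat from by omega,
            List.getElem?_eq_getElem hitlt]
          rfl
        rw [hstep]
      rw [hwnext] at hinvNext
      exact ih (i + 1) _ (by omega) (by omega) hinvNext

-- ===== VERDICT (by name: the statement is the Claim_ definition above) =====
theorem unique_start_index_spec : Claim_equal_unique_start_index := by
  unfold Claim_equal_unique_start_index
  intro s k _ hk
  unfold Spec_unique_start_index
  have hk' : 0 ≤ k := hk
  show pvALoop s.toList k
      ((PySem.List.slice s.toList none (some k)).foldl pvAddCount PySem.Dict.empty)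
      (PySem.List.pyRange k (s.toList.length : Int) 1)
    = pvBLoop s.toList k (PySem.List.pyRange k (s.toList.length : Int) 1)
  by_cases hlen : (s.toList.length : Int) < k
  · rw [PySem.List.pyRange_one_eq_nil (by omega)]
    rfl
  · have hpre : PySem.List.slice s.toList none (some k) = s.toList.take k.toNat :=
      PySem.List.slice_to s.toList hk'
    have hwin : PySem.List.slice s.toList (some (k - k)) (some k) = s.toList.take k.toNat := by
      rw [PySem.List.slice_toNat s.toList (by omega) hk']
      simp
    refine pvLoop_eq s.toList k hk' ((s.toList.length : Int) - k).toNat k _ le_rfl (by omega) ?_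
    rw [hwin, hpre]
    exact pvInv_init (s.toList.take k.toNat)
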